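-- pv_equiv track=rewrite | github.com/bullbin/madhatter | hat_io/asset_image/tiler.py | purgePaletteList
-- ===== SOURCE A (Python) =====
-- from typing import Dict, List, Optional, Tuple
--
-- def purgePaletteList(palette : List[int]) -> List[int]:
--     # TODO - Get palette length from image
--
--     endIndex = len(palette) // 3
--
--     for indexTriplet in range((len(palette) // 3) - 1, -1, -1):
--         indexPalette = indexTriplet * 3
--         tempTriplet = [palette[indexPalette],
--                        palette[indexPalette + 1],
--                        palette[indexPalette + 2]]
--
--         if tempTriplet[0] == tempTriplet[1] == tempTriplet[2]:  # Primitive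
--             if tempTriplet[0] == indexTriplet:
--                 endIndex = indexTriplet
--         else:
--             break
--
--     return list(palette[0:endIndex * 3])
-- ===== SOURCE B (Python) =====
-- def purgePaletteList(palette):
--     # Single forward pass: keep the earliest candidate index i with triplet == [i, i, i],
--     # resetting it whenever a non-primitive triplet is seen.
--     n = len(palette) // 3
--     cand = None
--     for i in range(n):
--         a, b, c = palette[3 * i], palette[3 * i + 1], palette[3 * i + 2]
--         if a == b == c:
--             if cand is None and a == i:
--                 cand = i
--         else:
--             cand = None
--     end = n if cand is None else cand
--     return list(palette[:end * 3])
-- ===== Notes on version B (the rewrite author's own statement) =====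
-- stated objective: alternative
-- what changed: Replaced A's backward scan that breaks at the first non-primitive triplet while repeatedly overwriting endIndex with a single forward fold that records the earliest index i whose triplet is [i,i,i] and resets the candidate whenever a non-primitive triplet appears.
import Mathlib
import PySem

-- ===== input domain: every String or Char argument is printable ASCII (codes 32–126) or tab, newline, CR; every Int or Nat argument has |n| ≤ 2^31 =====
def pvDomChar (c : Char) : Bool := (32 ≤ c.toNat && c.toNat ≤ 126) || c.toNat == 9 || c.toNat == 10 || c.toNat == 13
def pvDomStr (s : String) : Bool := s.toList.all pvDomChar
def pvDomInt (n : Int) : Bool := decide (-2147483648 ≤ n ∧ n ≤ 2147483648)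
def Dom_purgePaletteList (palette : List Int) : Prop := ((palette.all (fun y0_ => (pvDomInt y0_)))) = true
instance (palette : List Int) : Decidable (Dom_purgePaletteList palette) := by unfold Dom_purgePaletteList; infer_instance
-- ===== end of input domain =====

-- B replaces A's backward break-on-non-primitive scan (which keeps overwriting endIndex)
-- by one forward fold that keeps the earliest self-equal candidate and resets it at any
-- non-primitive triplet; same return value, objective: alternative decomposition.

-- ===== PORT A =====
-- the backward for-loop with `break`: recursion over the remaining index list
-- (indices are always in range 0..len-1 here, so pyGetD with default 0 is exact)
def purgeLoopA (palette : List Int) (idxs : List Int) (endIndex : Int) : Int :=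
  match idxs with
  | [] => endIndex
  | indexTriplet :: rest =>
    let indexPalette := indexTriplet * 3
    let t0 := PySem.List.pyGetD palette indexPalette 0
    let t1 := PySem.List.pyGetD palette (indexPalette + 1) 0
    let t2 := PySem.List.pyGetD palette (indexPalette + 2) 0
    if t0 = t1 ∧ t1 = t2 then
      purgeLoopA palette rest (if t0 = indexTriplet then indexTriplet else endIndex)
    else endIndex  -- break

def purgePaletteList (palette : List Int) : List Int :=
  let n : Int := PySem.Int.floordiv (palette.length : Int) 3
  let endIndex := purgeLoopA palette (PySem.List.pyRange (n - 1) (-1) (-1)) n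
  PySem.List.slice palette (some 0) (some (endIndex * 3))

-- ===== PORT B =====
-- one step of B's forward pass over i ∈ range(n)
def purgeStepB (palette : List Int) (cand : Option Int) (i : Int) : Option Int :=
  let a := PySem.List.pyGetD palette (3 * i) 0
  let b := PySem.List.pyGetD palette (3 * i + 1) 0
  let c := PySem.List.pyGetD palette (3 * i + 2) 0
  if a = b ∧ b = c then
    if cand = none ∧ a = i then some i else cand
  else
    none

def purgePaletteList_alt (palette : List Int) : List Int :=
  let n : Int := PySem.Int.floordiv (palette.length : Int) 3
  let cand := (PySem.List.pyRange 0 n 1).foldl (purgeStepB palette) none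
  let endNum := match cand with | none => n | some c => c
  PySem.List.slice palette (some 0) (some (endNum * 3))

-- ===== PRECONDITION & SPEC =====
def Spec_purgePaletteList (palette : List Int) (out : List Int) : Prop := out = purgePaletteList_alt palette
instance (palette : List Int) (out : List Int) : Decidable (Spec_purgePaletteList palette out) := by unfold Spec_purgePaletteList; infer_instance

-- ===== CLAIM (what is proved, stated in full; the proofs are below) =====
def Claim_equal_purgePaletteList : Prop := ∀ (palette : List Int), Dom_purgePaletteList palette → Spec_purgePaletteList palette (purgePaletteList palette)

-- ===== LEMMAS AND PROOFS =====

-- A's backward break-loop over xs.reverse computes B's forward fold over xs (getD the initial endIndex)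
theorem purgeLoopA_eq_foldl (palette : List Int) (xs : List Int) :
    ∀ e : Int, purgeLoopA palette xs.reverse e
      = (xs.foldl (purgeStepB palette) none).getD e := by
  induction xs using List.reverseRecOn with
  | nil => intro e; simp [purgeLoopA]
  | append_singleton xs x ih =>
    intro e
    rw [List.reverse_append, List.foldl_append]
    simp only [List.reverse_cons, List.reverse_nil, List.nil_append, List.singleton_append,
      List.foldl_cons, List.foldl_nil]
    show purgeLoopA palette (x :: xs.reverse) e
      = (purgeStepB palette (xs.foldl (purgeStepB palette) none) x).getD e
    simp only [purgeLoopA, purgeStepB]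
    have h3 : x * 3 = 3 * x := by ring
    rw [h3]
    by_cases hprim : PySem.List.pyGetD palette (3 * x) 0 = PySem.List.pyGetD palette (3 * x + 1) 0
        ∧ PySem.List.pyGetD palette (3 * x + 1) 0 = PySem.List.pyGetD palette (3 * x + 2) 0
    · rw [if_pos hprim, if_pos hprim, ih]
      cases hP : xs.foldl (purgeStepB palette) none with
      | none =>
        by_cases hx : PySem.List.pyGetD palette (3 * x) 0 = x <;> simp [hx]
      | some c => simp
    · rw [if_neg hprim, if_neg hprim]
      rfl

theorem purgePaletteList_spec : Claim_equal_purgePaletteList := by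
  intro palette _
  simp only [Spec_purgePaletteList, purgePaletteList, purgePaletteList_alt]
  have hr : PySem.List.pyRange ((PySem.Int.floordiv (palette.length : Int) 3) - 1) (-1) (-1)
      = (PySem.List.pyRange 0 (PySem.Int.floordiv (palette.length : Int) 3) 1).reverse := by
    rw [PySem.List.pyRange_neg_one_eq_reverse]
    norm_num
  rw [hr, purgeLoopA_eq_foldl]
  cases hP : (PySem.List.pyRange 0 (PySem.Int.floordiv (palette.length : Int) 3) 1).foldl
      (purgeStepB palette) none <;> simp
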